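-- pv_equiv track=rewrite | github.com/probapraise/project_dream | src/project_dream/report_generator.py | _build_foreshadowing
-- ===== SOURCE A (Python) =====
-- def _build_foreshadowing(sim_result: dict) -> list[str]:
--     action_logs = sim_result.get("action_logs", [])
--     hooks = []
--     if any(row.get("action_type") == "HIDE_PREVIEW" for row in action_logs):
--         hooks.append("가리기 이후 역유입(스트라이샌드) 가능성")
--     if any(row.get("action_type") == "LOCK_THREAD" for row in action_logs):
--         hooks.append("봉문 이후 타게시판 우회 확산 가능성")
--     if any(row.get("action_type") == "GHOST_THREAD" for row in action_logs):
--         hooks.append("유령처리 링크 공유에 의한 음지 확산")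
--     if not hooks:
--         hooks.append("운영 개입 전 여론 선점 경쟁")
--     return hooks
-- ===== SOURCE B (Python) =====
-- _HINTS = [
--     ("HIDE_PREVIEW", "가리기 이후 역유입(스트라이샌드) 가능성"),
--     ("LOCK_THREAD", "봉문 이후 타게시판 우회 확산 가능성"),
--     ("GHOST_THREAD", "유령처리 링크 공유에 의한 음지 확산"),
-- ]
--
--
-- def _build_foreshadowing(sim_result: dict) -> list[str]:
--     present = {row.get("action_type") for row in sim_result.get("action_logs", [])}
--     hooks = [hint for atype, hint in _HINTS if atype in present]
--     return hooks if hooks else ["운영 개입 전 여론 선점 경쟁"]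
-- ===== Notes on version B (the rewrite author's own statement) =====
-- stated objective: simpler
-- what changed: One pass collects the set of present action_type values, then a fixed ordered hint table is filtered against that set, replacing three separate any-scans over the log with a single precomputed index.
import Mathlib
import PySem

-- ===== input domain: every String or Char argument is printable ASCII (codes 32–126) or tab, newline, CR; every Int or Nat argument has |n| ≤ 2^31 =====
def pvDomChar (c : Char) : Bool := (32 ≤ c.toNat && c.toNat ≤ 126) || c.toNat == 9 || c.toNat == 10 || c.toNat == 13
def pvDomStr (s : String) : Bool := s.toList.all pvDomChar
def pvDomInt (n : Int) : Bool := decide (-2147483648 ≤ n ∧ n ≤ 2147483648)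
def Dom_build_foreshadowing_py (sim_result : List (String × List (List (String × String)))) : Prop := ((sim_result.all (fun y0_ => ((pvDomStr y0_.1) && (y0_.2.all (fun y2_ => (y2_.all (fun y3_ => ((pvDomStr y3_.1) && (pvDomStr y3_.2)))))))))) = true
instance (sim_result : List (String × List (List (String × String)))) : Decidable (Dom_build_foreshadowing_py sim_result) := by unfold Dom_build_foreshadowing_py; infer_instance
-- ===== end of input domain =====

-- B replaces A's three separate any-scans of the log with one precomputed set of
-- present action_type values filtered through a fixed ordered hint table (simpler).

-- ===== PORT A =====
def build_foreshadowing_py (sim_result : List (String × List (List (String × String)))) : List String :=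
  let action_logs := PySem.Dict.getD (PySem.Dict.mk sim_result) "action_logs" []
  let hooks : List String := []
  let hooks := if action_logs.any (fun row => PySem.Dict.get? (PySem.Dict.mk row) "action_type" == some "HIDE_PREVIEW")
    then hooks ++ ["가리기 이후 역유입(스트라이샌드) 가능성"] else hooks
  let hooks := if action_logs.any (fun row => PySem.Dict.get? (PySem.Dict.mk row) "action_type" == some "LOCK_THREAD")
    then hooks ++ ["봉문 이후 타게시판 우회 확산 가능성"] else hooks
  let hooks := if action_logs.any (fun row => PySem.Dict.get? (PySem.Dict.mk row) "action_type" == some "GHOST_THREAD")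
    then hooks ++ ["유령처리 링크 공유에 의한 음지 확산"] else hooks
  let hooks := if hooks = [] then hooks ++ ["운영 개입 전 여론 선점 경쟁"] else hooks
  hooks

-- ===== PORT B =====
def pvHints : List (String × String) :=
  [("HIDE_PREVIEW", "가리기 이후 역유입(스트라이샌드) 가능성"),
   ("LOCK_THREAD", "봉문 이후 타게시판 우회 확산 가능성"),
   ("GHOST_THREAD", "유령처리 링크 공유에 의한 음지 확산")]

def build_foreshadowing_py_alt (sim_result : List (String × List (List (String × String)))) : List String :=
  let present : PySem.Set (Option String) :=
    PySem.Set.ofList ((PySem.Dict.getD (PySem.Dict.mk sim_result) "action_logs" []).map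
      (fun row => PySem.Dict.get? (PySem.Dict.mk row) "action_type"))
  let hooks := (pvHints.filter (fun p => PySem.Set.contains present (some p.1))).map (fun p => p.2)
  if hooks = [] then ["운영 개입 전 여론 선점 경쟁"] else hooks

-- ===== PRECONDITION & SPEC =====
def Spec_build_foreshadowing_py (sim_result : List (String × List (List (String × String)))) (out : List String) : Prop := out = build_foreshadowing_py_alt sim_result
instance (sim_result : List (String × List (List (String × String)))) (out : List String) : Decidable (Spec_build_foreshadowing_py sim_result out) := by unfold Spec_build_foreshadowing_py; infer_instance

-- ===== CLAIM (what is proved, stated in full; the proofs are below) =====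
def Claim_equal_build_foreshadowing_py : Prop := ∀ (sim_result : List (String × List (List (String × String)))), Dom_build_foreshadowing_py sim_result → Spec_build_foreshadowing_py sim_result (build_foreshadowing_py sim_result)

-- ===== LEMMAS AND PROOFS =====

-- ===== VERDICT (by name: the statement is the Claim_ definition above) =====
lemma contains_ofList_map_eq_any (logs : List (List (String × String))) (t : String) :
    PySem.Set.contains (PySem.Set.ofList (logs.map (fun row => PySem.Dict.get? (PySem.Dict.mk row) "action_type")))
      (some t)
      = logs.any (fun row => PySem.Dict.get? (PySem.Dict.mk row) "action_type" == some t) := by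
  rw [Bool.eq_iff_iff, List.any_eq_true]
  simp only [PySem.Set.contains, List.contains_iff_mem, PySem.Set.mem_ofList, List.mem_map,
    beq_iff_eq]

theorem build_foreshadowing_py_spec : Claim_equal_build_foreshadowing_py := by
  intro sim_result _
  unfold Spec_build_foreshadowing_py build_foreshadowing_py build_foreshadowing_py_alt
  simp only [pvHints, List.filter, contains_ofList_map_eq_any]
  generalize ((PySem.Dict.mk sim_result).getD "action_logs" []).any
      (fun row => (PySem.Dict.mk row).get? "action_type" == some "HIDE_PREVIEW") = a
  generalize ((PySem.Dict.mk sim_result).getD "action_logs" []).any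
      (fun row => (PySem.Dict.mk row).get? "action_type" == some "LOCK_THREAD") = b
  generalize ((PySem.Dict.mk sim_result).getD "action_logs" []).any
      (fun row => (PySem.Dict.mk row).get? "action_type" == some "GHOST_THREAD") = c
  cases a <;> cases b <;> cases c <;> rfl
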